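-- pv_equiv track=rewrite | github.com/rpapub/xaml-parser | python/xaml_parser/utils.py | classify_activity_type
-- ===== SOURCE A (Python) =====
-- def classify_activity_type(activity_type: str) -> str:
--     """Classify activity type into categories.
--
--     Args:
--         activity_type: Activity type name
--
--     Returns:
--         Activity category
--     """
--     activity_type_lower = activity_type.lower()
--
--     # UI Automation activities - use more specific patterns to avoid false matches
--     ui_patterns = [
--         'click', 'typetext', 'typeinto', 'gettext', 'getfulltext', 'getvalue',
--         'find', 'wait', 'hover', 'drag', 'select', 'image', 'application'
--     ]
--     if any(ui_pattern in activity_type_lower for ui_pattern in ui_patterns):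
--         return 'ui_automation'
--
--     # Flow control activities
--     if any(flow_term in activity_type_lower for flow_term in [
--         'sequence', 'if', 'switch', 'while', 'foreach', 'parallel', 'flowchart'
--     ]):
--         return 'flow_control'
--
--     # Data activities
--     if any(data_term in activity_type_lower for data_term in [
--         'assign', 'invoke', 'data', 'read', 'write', 'build', 'filter'
--     ]):
--         return 'data_processing'
--
--     # System activities
--     if any(sys_term in activity_type_lower for sys_term in [
--         'log', 'message', 'delay', 'kill', 'start', 'environment'
--     ]):
--         return 'system'
--
--     # Exception handling
--     if any(exc_term in activity_type_lower for exc_term in [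
--         'try', 'catch', 'throw', 'rethrow', 'finally'
--     ]):
--         return 'exception_handling'
--
--     return 'other'
-- ===== SOURCE B (Python) =====
-- # Input-driven classification: index all patterns in one dict mapping
-- # pattern -> (priority rank, category); slide a window over the lowercased
-- # input, look every window prefix up in the dict, and keep the hit with the
-- # smallest rank.  Priority is enforced by min-rank aggregation instead of
-- # ordered scans over the pattern groups.
--
-- _GROUPS = [
--     ('ui_automation', ['click', 'typetext', 'typeinto', 'gettext', 'getfulltext',
--                        'getvalue', 'find', 'wait', 'hover', 'drag', 'select',
--                        'image', 'application']),
--     ('flow_control', ['sequence', 'if', 'switch', 'while', 'foreach',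
--                       'parallel', 'flowchart']),
--     ('data_processing', ['assign', 'invoke', 'data', 'read', 'write',
--                          'build', 'filter']),
--     ('system', ['log', 'message', 'delay', 'kill', 'start', 'environment']),
--     ('exception_handling', ['try', 'catch', 'throw', 'rethrow', 'finally']),
-- ]
--
-- _INDEX = {}
-- for _rank, (_cat, _pats) in enumerate(_GROUPS):
--     for _p in _pats:
--         _INDEX[_p] = (_rank, _cat)
--
-- _MAXLEN = max(len(_p) for _p in _INDEX)
--
--
-- def classify_activity_type(activity_type: str) -> str:
--     """Classify activity type into categories.
--
--     Args:
--         activity_type: Activity type name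
--
--     Returns:
--         Activity category
--     """
--     best = None
--     suffix = activity_type.lower()
--     while suffix:
--         for length in range(1, min(len(suffix), _MAXLEN) + 1):
--             hit = _INDEX.get(suffix[:length])
--             if hit is not None and (best is None or hit[0] < best[0]):
--                 best = hit
--         suffix = suffix[1:]
--     return 'other' if best is None else best[1]
-- ===== Notes on version B (the rewrite author's own statement) =====
-- stated objective: alternative
-- what changed: Instead of five ordered any()-scans over pattern groups, B indexes all patterns in a dict mapping pattern to (rank, category), slides a window over the lowercased input looking up every bounded-length prefix, and returns the category of the minimum-rank hit; priority comes from min-rank aggregation, not scan order.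
import Mathlib
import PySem

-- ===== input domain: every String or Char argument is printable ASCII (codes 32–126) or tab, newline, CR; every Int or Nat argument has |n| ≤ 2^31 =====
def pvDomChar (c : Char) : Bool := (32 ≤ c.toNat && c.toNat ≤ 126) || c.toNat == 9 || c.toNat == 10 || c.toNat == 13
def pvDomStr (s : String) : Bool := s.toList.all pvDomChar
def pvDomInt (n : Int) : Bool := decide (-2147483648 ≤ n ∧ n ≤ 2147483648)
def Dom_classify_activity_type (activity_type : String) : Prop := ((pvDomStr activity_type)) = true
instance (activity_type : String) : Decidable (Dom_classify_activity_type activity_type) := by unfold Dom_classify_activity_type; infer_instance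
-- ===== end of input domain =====

set_option maxRecDepth 100000

-- B replaces A's five ordered any()-scans by an input-driven scan: a dict from
-- pattern to (rank, category), lookups of every bounded window of the lowered
-- input, keeping the minimum-rank hit (objective: alternative); same return value.

-- ===== PORT A =====
def classify_activity_type (activity_type : String) : String :=
  let activity_type_lower := PySem.Str.lower activity_type
  if (["click", "typetext", "typeinto", "gettext", "getfulltext", "getvalue",
       "find", "wait", "hover", "drag", "select", "image", "application"].any
        (fun ui_pattern => PySem.Str.isIn ui_pattern activity_type_lower)) then "ui_automation"
  else if (["sequence", "if", "switch", "while", "foreach", "parallel", "flowchart"].any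
        (fun flow_term => PySem.Str.isIn flow_term activity_type_lower)) then "flow_control"
  else if (["assign", "invoke", "data", "read", "write", "build", "filter"].any
        (fun data_term => PySem.Str.isIn data_term activity_type_lower)) then "data_processing"
  else if (["log", "message", "delay", "kill", "start", "environment"].any
        (fun sys_term => PySem.Str.isIn sys_term activity_type_lower)) then "system"
  else if (["try", "catch", "throw", "rethrow", "finally"].any
        (fun exc_term => PySem.Str.isIn exc_term activity_type_lower)) then "exception_handling"
  else "other"

-- ===== PORT B =====
-- Source B's _INDEX: pattern -> (priority rank, category), built group by group
def pvIndex : PySem.Dict (List Char) (Int × String) :=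
  PySem.Dict.ofList
    ((["click", "typetext", "typeinto", "gettext", "getfulltext", "getvalue",
       "find", "wait", "hover", "drag", "select", "image", "application"].map
        (fun p => (p.toList, ((0 : Int), "ui_automation")))) ++
     (["sequence", "if", "switch", "while", "foreach", "parallel", "flowchart"].map
        (fun p => (p.toList, ((1 : Int), "flow_control")))) ++
     (["assign", "invoke", "data", "read", "write", "build", "filter"].map
        (fun p => (p.toList, ((2 : Int), "data_processing")))) ++
     (["log", "message", "delay", "kill", "start", "environment"].map
        (fun p => (p.toList, ((3 : Int), "system")))) ++
     (["try", "catch", "throw", "rethrow", "finally"].map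
        (fun p => (p.toList, ((4 : Int), "exception_handling")))))

-- Source B's _MAXLEN = max(len(p) for p in _INDEX)
def pvMaxLen : Nat := (pvIndex.keys.map List.length).foldl max 0

-- one step of the inner for-loop's body: update best with a dict hit (if any)
def pvStep (best : Option (Int × String)) (hit? : Option (Int × String)) : Option (Int × String) :=
  match hit? with
  | none => best
  | some hit =>
      match best with
      | none => some hit
      | some b => if hit.1 < b.1 then some hit else some b

-- the inner for-loop: look up every prefix suffix[:length], length = 1..min(len,MAXLEN)
def pvInner (suffix : List Char) (best : Option (Int × String)) : Option (Int × String) :=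
  (PySem.List.pyRange 1 ((min suffix.length pvMaxLen : Nat) + 1) 1).foldl
    (fun best L => pvStep best (pvIndex.get? (PySem.List.slice suffix none (some L)))) best

-- the while-loop: suffix := suffix[1:] each iteration
def pvWhile : List Char → Option (Int × String) → Option (Int × String)
  | [], best => best
  | c :: rest, best => pvWhile rest (pvInner (c :: rest) best)

def classify_activity_type_alt (activity_type : String) : String :=
  match pvWhile (PySem.Str.lower activity_type).toList none with
  | none => "other"
  | some b => b.2

-- ===== PRECONDITION & SPEC =====
def Spec_classify_activity_type (activity_type : String) (out : String) : Prop := out = classify_activity_type_alt activity_type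
instance (activity_type : String) (out : String) : Decidable (Spec_classify_activity_type activity_type out) := by unfold Spec_classify_activity_type; infer_instance

-- ===== CLAIM (what is proved, stated in full; the proofs are below) =====
def Claim_equal_classify_activity_type : Prop := ∀ (activity_type : String), Dom_classify_activity_type activity_type → Spec_classify_activity_type activity_type (classify_activity_type activity_type)

-- ===== LEMMAS AND PROOFS =====

-- the five pattern groups, as strings (A's literals) and as char lists (B's keys)
def pvPatsS : Nat → List String
  | 0 => ["click", "typetext", "typeinto", "gettext", "getfulltext", "getvalue",
          "find", "wait", "hover", "drag", "select", "image", "application"]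
  | 1 => ["sequence", "if", "switch", "while", "foreach", "parallel", "flowchart"]
  | 2 => ["assign", "invoke", "data", "read", "write", "build", "filter"]
  | 3 => ["log", "message", "delay", "kill", "start", "environment"]
  | _ => ["try", "catch", "throw", "rethrow", "finally"]

def pvPatsL (g : Nat) : List (List Char) := (pvPatsS g).map String.toList

def pvCatOf : Nat → String
  | 0 => "ui_automation"
  | 1 => "flow_control"
  | 2 => "data_processing"
  | 3 => "system"
  | _ => "exception_handling"

-- does group g match the lowered input l?
def pvM (g : Nat) (l : List Char) : Bool := (pvPatsL g).any (fun p => PySem.Chars.isIn p l)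

-- all keys the scan looks up
def pvKeysAt (s : List Char) : List (List Char) :=
  (PySem.List.pyRange 1 ((min s.length pvMaxLen : Nat) + 1) 1).map
    (fun L => PySem.List.slice s none (some L))

def pvAllKeys : List Char → List (List Char)
  | [] => []
  | c :: rest => pvKeysAt (c :: rest) ++ pvAllKeys rest

def pvFold (best : Option (Int × String)) (ks : List (List Char)) : Option (Int × String) :=
  ks.foldl (fun b k => pvStep b (pvIndex.get? k)) best

-- dict facts (finite checks)
theorem pvIndex_nodup : pvIndex.keys.Nodup := by decide

theorem pvIndex_items_shape :
    ∀ e ∈ pvIndex.items, ∃ g ∈ List.range 5, e.2 = ((g : Int), pvCatOf g) ∧ e.1 ∈ pvPatsL g := by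
  decide

theorem pvIndex_mem :
    ∀ g, g < 5 → ∀ p ∈ pvPatsL g,
      (p, ((g : Int), pvCatOf g)) ∈ pvIndex.items ∧ p ≠ [] ∧ p.length ≤ pvMaxLen := by
  decide

-- loop characterisations
theorem pvInner_eq (s : List Char) (best : Option (Int × String)) :
    pvInner s best = pvFold best (pvKeysAt s) := by
  unfold pvInner pvFold pvKeysAt
  rw [List.foldl_map]

theorem pvWhile_eq (l : List Char) (best : Option (Int × String)) :
    pvWhile l best = pvFold best (pvAllKeys l) := by
  induction l generalizing best with
  | nil => simp [pvWhile, pvAllKeys, pvFold]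
  | cons c rest ih => simp [pvWhile, pvAllKeys, pvFold, List.foldl_append, ih, pvInner_eq]

theorem pvFold_none :
    ∀ (ks : List (List Char)) (best : Option (Int × String)),
      (∀ k ∈ ks, pvIndex.get? k = none) → pvFold best ks = best := by
  intro ks
  induction ks with
  | nil => intro best _; rfl
  | cons k ks ih =>
      intro best h
      simp only [pvFold, List.foldl_cons]
      rw [h k (by simp), show pvStep best none = best from rfl]
      exact ih best (fun k' hk' => h k' (by simp [hk']))

theorem pvFold_mono :
    ∀ (ks : List (List Char)) (b : Int × String),
      ∃ r, pvFold (some b) ks = some r ∧ r.1 ≤ b.1 := by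
  intro ks
  induction ks with
  | nil => intro b; exact ⟨b, rfl, le_refl _⟩
  | cons k ks ih =>
      intro b
      simp only [pvFold, List.foldl_cons]
      cases hk : pvIndex.get? k with
      | none => exact ih b
      | some v =>
          simp only [pvStep]
          split_ifs with hlt
          · obtain ⟨r, hr, hle⟩ := ih v
            exact ⟨r, hr, le_trans hle (le_of_lt hlt)⟩
          · exact ih b

theorem pvFold_hit :
    ∀ (ks : List (List Char)) (best : Option (Int × String)) (k : List Char), k ∈ ks →
      ∀ v : Int × String, pvIndex.get? k = some v →
        ∃ r, pvFold best ks = some r ∧ r.1 ≤ v.1 := by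
  intro ks
  induction ks with
  | nil => intro _ _ h; cases h
  | cons k' ks ih =>
      intro best k hk v hv
      simp only [pvFold, List.foldl_cons]
      rcases List.mem_cons.mp hk with h | h
      · subst h
        rw [hv]
        cases best with
        | none => exact pvFold_mono ks v
        | some b =>
            simp only [pvStep]
            split_ifs with hlt
            · exact pvFold_mono ks v
            · obtain ⟨r, hr, hle⟩ := pvFold_mono ks b
              exact ⟨r, hr, le_trans hle (not_lt.mp hlt)⟩
      · exact ih _ k h v hv

theorem pvFold_provenance :
    ∀ (ks : List (List Char)) (best : Option (Int × String)) (r : Int × String),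
      pvFold best ks = some r →
        best = some r ∨ ∃ k ∈ ks, pvIndex.get? k = some r := by
  intro ks
  induction ks with
  | nil => intro best r h; exact Or.inl h
  | cons k ks ih =>
      intro best r h
      simp only [pvFold, List.foldl_cons] at h
      rcases ih _ _ h with hstep | ⟨k', hk', hv⟩
      · cases hget : pvIndex.get? k with
        | none =>
            rw [hget] at hstep
            exact Or.inl hstep
        | some v =>
            rw [hget] at hstep
            cases best with
            | none =>
                simp only [pvStep] at hstep
                exact Or.inr ⟨k, by simp, hget.trans hstep⟩
            | some b =>
                simp only [pvStep] at hstep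
                split_ifs at hstep with hlt
                · exact Or.inr ⟨k, by simp, hget.trans hstep⟩
                · exact Or.inl hstep
      · exact Or.inr ⟨k', by simp [hk'], hv⟩

-- key-set characterisation: every looked-up key is an infix of the input
theorem pvAllKeys_infix (l k : List Char) (h : k ∈ pvAllKeys l) : k <:+: l := by
  induction l with
  | nil => cases h
  | cons c rest ih =>
      rcases List.mem_append.mp h with h | h
      · obtain ⟨L, hL, rfl⟩ := List.mem_map.mp h
        have h1 : (1 : Int) ≤ L := (PySem.List.mem_pyRange_one.mp hL).1
        rw [PySem.List.slice_to _ (by omega)]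
        exact (List.take_prefix _ _).isInfix
      · exact List.infix_cons (ih h)

-- and every short nonempty infix of the input is looked up
theorem pvAllKeys_complete (l p : List Char) (hne : p ≠ []) (hlen : p.length ≤ pvMaxLen)
    (h : p <:+: l) : p ∈ pvAllKeys l := by
  induction l with
  | nil => exact absurd (by simpa using h) hne
  | cons c rest ih =>
      rcases List.infix_cons_iff.mp h with hpre | hinf
      · apply List.mem_append.mpr (Or.inl _)
        apply List.mem_map.mpr
        refine ⟨(p.length : Int), ?_, ?_⟩
        · rw [PySem.List.mem_pyRange_one]
          have h1 : p.length ≤ (c :: rest).length := hpre.length_le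
          have h2 : 1 ≤ p.length := Nat.one_le_iff_ne_zero.mpr (by simpa using hne)
          constructor
          · exact_mod_cast h2
          · have : p.length ≤ min (c :: rest).length pvMaxLen := le_min h1 hlen
            omega
        · rw [PySem.List.slice_to _ (by positivity)]
          simp only [Int.toNat_natCast]
          exact (List.prefix_iff_eq_take.mp hpre).symm
      · exact List.mem_append.mpr (Or.inr (ih hinf))

-- hit → the hit's value has a group's shape and that group matches
theorem pvHit_matched (l k : List Char) (v : Int × String)
    (hk : k ∈ pvAllKeys l) (hv : pvIndex.get? k = some v) :
    ∃ g : Nat, g < 5 ∧ v = ((g : Int), pvCatOf g) ∧ pvM g l = true := by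
  have hmem : (k, v) ∈ pvIndex.items := by
    exact PySem.Dict.mem_items_of_get?_eq_some _ hv
  obtain ⟨g, hgmem, hshape, hkey⟩ := pvIndex_items_shape _ hmem
  refine ⟨g, List.mem_range.mp hgmem, hshape, ?_⟩
  apply List.any_eq_true.mpr
  refine ⟨k, hkey, ?_⟩
  exact (PySem.Chars.isIn_iff_infix _ _).mpr (pvAllKeys_infix l k hk)

-- group matches → a key carrying that group's value is looked up
theorem pvMatched_hit (l : List Char) (g : Nat) (hg : g < 5) (hm : pvM g l = true) :
    ∃ k ∈ pvAllKeys l, pvIndex.get? k = some ((g : Int), pvCatOf g) := by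
  obtain ⟨p, hp, hin⟩ := List.any_eq_true.mp hm
  obtain ⟨hitem, hne, hlen⟩ := pvIndex_mem g hg p hp
  have hin' : p <:+: l := (PySem.Chars.isIn_iff_infix _ _).mp hin
  refine ⟨p, pvAllKeys_complete l p hne hlen hin', ?_⟩
  exact PySem.Dict.get?_of_mem_items _ hitem pvIndex_nodup

-- the fold returns the least matching group's value
theorem pvFoldAnswer (l : List Char) (g : Nat) (hg : g < 5) (hm : pvM g l = true)
    (hmin : ∀ g', g' < g → pvM g' l = false) :
    pvFold none (pvAllKeys l) = some ((g : Int), pvCatOf g) := by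
  obtain ⟨k, hk, hv⟩ := pvMatched_hit l g hg hm
  obtain ⟨r, hr, hle⟩ := pvFold_hit _ none k hk _ hv
  rcases pvFold_provenance _ _ _ hr with hcon | ⟨k', hk', hv'⟩
  · cases hcon
  · obtain ⟨g', hg5', hshape, hmg'⟩ := pvHit_matched l k' r hk' hv'
    have hnot : ¬ g' < g := fun hlt => by
      rw [hmin g' hlt] at hmg'; exact Bool.false_ne_true hmg'
    have hle2 : (g' : Int) ≤ (g : Int) := by rw [hshape] at hle; simpa using hle
    have hgg : g' = g := le_antisymm (by exact_mod_cast hle2) (not_lt.mp hnot)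
    subst hgg
    rw [hr, hshape]

-- no group matches → every lookup misses → the fold returns nothing
theorem pvFoldNone (l : List Char) (hall : ∀ g, g < 5 → pvM g l = false) :
    pvFold none (pvAllKeys l) = none := by
  apply pvFold_none
  intro k hk
  cases hv : pvIndex.get? k with
  | none => rfl
  | some v =>
      obtain ⟨g, hg5, _, hmg⟩ := pvHit_matched l k v hk hv
      rw [hall g hg5] at hmg
      exact absurd hmg Bool.false_ne_true

-- the main characterisation of B's loop
theorem pvWhile_characterisation (l : List Char) :
    pvWhile l none =
      (if pvM 0 l then some ((0 : Int), pvCatOf 0)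
       else if pvM 1 l then some ((1 : Int), pvCatOf 1)
       else if pvM 2 l then some ((2 : Int), pvCatOf 2)
       else if pvM 3 l then some ((3 : Int), pvCatOf 3)
       else if pvM 4 l then some ((4 : Int), pvCatOf 4)
       else none) := by
  rw [pvWhile_eq]
  cases h0 : pvM 0 l with
  | true =>
      rw [if_pos rfl]
      exact pvFoldAnswer l 0 (by norm_num) h0 (fun g' hg' => absurd hg' (Nat.not_lt_zero g'))
  | false =>
      rw [if_neg (by simp [h0])]
      cases h1 : pvM 1 l with
      | true =>
          rw [if_pos rfl]
          exact pvFoldAnswer l 1 (by norm_num) h1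
            (fun g' hg' => by interval_cases g' <;> exact h0)
      | false =>
          rw [if_neg (by simp [h1])]
          cases h2 : pvM 2 l with
          | true =>
              rw [if_pos rfl]
              exact pvFoldAnswer l 2 (by norm_num) h2
                (fun g' hg' => by interval_cases g' <;> first | exact h0 | exact h1)
          | false =>
              rw [if_neg (by simp [h2])]
              cases h3 : pvM 3 l with
              | true =>
                  rw [if_pos rfl]
                  exact pvFoldAnswer l 3 (by norm_num) h3
                    (fun g' hg' => by interval_cases g' <;> first | exact h0 | exact h1 | exact h2)
              | false =>
                  rw [if_neg (by simp [h3])]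
                  cases h4 : pvM 4 l with
                  | true =>
                      rw [if_pos rfl]
                      exact pvFoldAnswer l 4 (by norm_num) h4
                        (fun g' hg' => by
                          interval_cases g' <;> first | exact h0 | exact h1 | exact h2 | exact h3)
                  | false =>
                      rw [if_neg (by simp [h4])]
                      exact pvFoldNone l
                        (fun g hg => by
                          interval_cases g <;>
                            first | exact h0 | exact h1 | exact h2 | exact h3 | exact h4)

-- A's group tests equal pvM on the lowered char list
theorem pvM_eq (g : Nat) (low : String) :
    (pvPatsS g).any (fun p => PySem.Str.isIn p low) = pvM g low.toList := by
  simp [pysem, pvM, pvPatsL, List.any_map]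

-- ===== VERDICT (by name: the statement is the Claim_ definition above) =====
theorem classify_activity_type_spec : Claim_equal_classify_activity_type := by
  intro activity_type _
  unfold Spec_classify_activity_type
  simp only [classify_activity_type, classify_activity_type_alt]
  rw [show (["click", "typetext", "typeinto", "gettext", "getfulltext", "getvalue",
       "find", "wait", "hover", "drag", "select", "image", "application"] : List String) = pvPatsS 0 from rfl,
     show (["sequence", "if", "switch", "while", "foreach", "parallel", "flowchart"] : List String) = pvPatsS 1 from rfl,
     show (["assign", "invoke", "data", "read", "write", "build", "filter"] : List String) = pvPatsS 2 from rfl,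
     show (["log", "message", "delay", "kill", "start", "environment"] : List String) = pvPatsS 3 from rfl,
     show (["try", "catch", "throw", "rethrow", "finally"] : List String) = pvPatsS 4 from rfl,
     pvM_eq, pvM_eq, pvM_eq, pvM_eq, pvM_eq, pvWhile_characterisation]
  split_ifs <;> rfl
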